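-- pv_equiv track=rewrite | github.com/junhyupoh98/upakiwoom | backend/python/vision_bridge.py | get_candidate_models
-- ===== SOURCE A (Python) =====
-- from typing import Dict, Optional, Tuple, List, Any, Callable
--
-- def get_candidate_models(selected_model: Optional[str], available_models_clean: List[str]) -> List[str]:
--     """사용할 Gemini 모델 후보 목록 생성 (pic_me 스타일)"""
--     model_names: List[str] = []
--     # 항상 사용자가 선택한 모델을 최우선으로 시도 (목록에 없더라도)
--     if selected_model:
--         model_names.append(selected_model)
--
--     if available_models_clean:
--         preferred = [
--             "gemini-2.5-pro-preview-03-25",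
--             "gemini-2.5-pro-preview",
--             "gemini-1.5-flash",
--             "gemini-1.5-pro",
--             "gemini-pro",
--         ]
--         for name in (n for n in preferred if n in available_models_clean and n not in model_names):
--             model_names.append(name)
--         for candidate in available_models_clean:
--             if candidate not in model_names and "gemini" in candidate.lower():
--                 model_names.append(candidate)
--
--     if not model_names:
--         model_names = ["gemini-1.5-flash", "gemini-1.5-pro", "gemini-pro"]
--
--     return model_names
-- ===== SOURCE B (Python) =====
-- def get_candidate_models(selected_model, available_models_clean):
--     preferred = [
--         "gemini-2.5-pro-preview-03-25",
--         "gemini-2.5-pro-preview",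
--         "gemini-1.5-flash",
--         "gemini-1.5-pro",
--         "gemini-pro",
--     ]
--     # first occurrences of the gemini-containing available models
--     gem = []
--     for c in available_models_clean:
--         if "gemini" in c.lower() and c not in gem:
--             gem.append(c)
--     # stable sort by preferred rank (non-preferred models keep their order at the end)
--     ordered = sorted(gem, key=lambda c: preferred.index(c) if c in preferred else len(preferred))
--     out = ([selected_model] if selected_model else []) + [c for c in ordered if c != selected_model]
--     return out or ["gemini-1.5-flash", "gemini-1.5-pro", "gemini-pro"]
-- ===== Notes on version B (the rewrite author's own statement) =====
-- stated objective: alternative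
-- what changed: A builds the result by a preferred-list membership scan followed by a deduplicating scan of the available list; B instead dedups the gemini-containing available models once and orders them with a single stable sort keyed by preferred-rank, then prepends the selected model and filters it out of the sorted tail.
import Mathlib
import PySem

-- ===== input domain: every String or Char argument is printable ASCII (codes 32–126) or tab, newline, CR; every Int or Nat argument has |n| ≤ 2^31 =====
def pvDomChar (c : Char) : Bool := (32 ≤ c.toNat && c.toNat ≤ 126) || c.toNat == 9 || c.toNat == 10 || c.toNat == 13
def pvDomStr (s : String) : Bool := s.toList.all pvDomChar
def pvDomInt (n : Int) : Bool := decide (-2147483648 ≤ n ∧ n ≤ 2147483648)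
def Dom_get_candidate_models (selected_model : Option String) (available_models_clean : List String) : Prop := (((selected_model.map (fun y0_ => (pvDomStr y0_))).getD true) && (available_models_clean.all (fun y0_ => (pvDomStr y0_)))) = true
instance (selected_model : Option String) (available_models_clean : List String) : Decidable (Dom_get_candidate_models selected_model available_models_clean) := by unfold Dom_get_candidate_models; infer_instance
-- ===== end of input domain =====

-- B replaces A's two priority-ordered scans by: dedup the gemini-containing available
-- models once, then one stable sort by preferred-rank (objective: alternative algorithm).

-- the `preferred` literal both Pythons contain
def pvPreferred : List String :=
  ["gemini-2.5-pro-preview-03-25", "gemini-2.5-pro-preview",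
   "gemini-1.5-flash", "gemini-1.5-pro", "gemini-pro"]

def pvFallback : List String := ["gemini-1.5-flash", "gemini-1.5-pro", "gemini-pro"]

-- '"gemini" in c.lower()' (appears verbatim in both Pythons)
def pvGem (c : String) : Bool := PySem.Str.isIn "gemini" (PySem.Str.lower c)

-- '[selected_model] if selected_model else []' / the initial 'if selected_model: append'
-- (Python truthiness: None and "" are falsy)
def pvHead (selected_model : Option String) : List String :=
  match selected_model with
  | some s => if s = "" then [] else [s]
  | none => []

-- ===== PORT A =====
def get_candidate_models (selected_model : Option String) (available_models_clean : List String) : List String :=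
  let m0 := pvHead selected_model
  let m2 :=
    if available_models_clean = [] then m0
    else
      -- for name in (n for n in preferred if n in available and n not in model_names): append
      let m1 := pvPreferred.foldl
        (fun acc n => if available_models_clean.contains n && !acc.contains n then acc ++ [n] else acc) m0
      -- for candidate in available: if candidate not in model_names and "gemini" in candidate.lower(): append
      available_models_clean.foldl
        (fun acc c => if !acc.contains c && pvGem c then acc ++ [c] else acc) m1
  if m2 = [] then pvFallback else m2

-- ===== PORT B =====
-- 'preferred.index(c) if c in preferred else len(preferred)'
def pvRank (c : String) : Nat := (PySem.List.index? pvPreferred c).getD pvPreferred.length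

def get_candidate_models_alt (selected_model : Option String) (available_models_clean : List String) : List String :=
  -- gem = []; for c in available: if "gemini" in c.lower() and c not in gem: gem.append(c)
  let gem := available_models_clean.foldl
    (fun acc c => if pvGem c && !acc.contains c then acc ++ [c] else acc) []
  -- ordered = sorted(gem, key=rank)  (stable)
  let ordered := PySem.List.sorted gem pvRank false
  let out := pvHead selected_model ++ ordered.filter
    (fun c => match selected_model with | some s => decide (c ≠ s) | none => true)
  if out = [] then pvFallback else out

-- ===== PRECONDITION & SPEC =====
def Spec_get_candidate_models (selected_model : Option String) (available_models_clean : List String) (out : List String) : Prop := out = get_candidate_models_alt selected_model available_models_clean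
instance (selected_model : Option String) (available_models_clean : List String) (out : List String) : Decidable (Spec_get_candidate_models selected_model available_models_clean out) := by unfold Spec_get_candidate_models; infer_instance

-- ===== CLAIM (what is proved, stated in full; the proofs are below) =====
def Claim_equal_get_candidate_models : Prop := ∀ (selected_model : Option String) (available_models_clean : List String), Dom_get_candidate_models selected_model available_models_clean → Spec_get_candidate_models selected_model available_models_clean (get_candidate_models selected_model available_models_clean)

-- ===== LEMMAS AND PROOFS =====

-- the list appended by a 'seen'-deduplicating gemini scan, starting from `seen`
def pvDD (seen : List String) : List String → List String
  | [] => []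
  | c :: cs => if pvGem c && !seen.contains c then c :: pvDD (seen ++ [c]) cs else pvDD seen cs

theorem pvFoldB_eq (l : List String) : ∀ acc : List String,
    l.foldl (fun acc c => if pvGem c && !acc.contains c then acc ++ [c] else acc) acc
      = acc ++ pvDD acc l := by
  induction l with
  | nil => intro acc; simp [pvDD]
  | cons c cs ih =>
    intro acc
    rw [List.foldl_cons]
    by_cases h : (pvGem c && !acc.contains c) = true
    · rw [if_pos h, ih]
      simp only [pvDD, if_pos h]
      simp
    · rw [if_neg h, ih]
      simp only [pvDD, if_neg h]

theorem pvFold2_eq (l : List String) : ∀ acc : List String,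
    l.foldl (fun acc c => if !acc.contains c && pvGem c then acc ++ [c] else acc) acc
      = acc ++ pvDD acc l := by
  induction l with
  | nil => intro acc; simp [pvDD]
  | cons c cs ih =>
    intro acc
    rw [List.foldl_cons,
      show (!acc.contains c && pvGem c) = (pvGem c && !acc.contains c) from Bool.and_comm _ _]
    by_cases h : (pvGem c && !acc.contains c) = true
    · rw [if_pos h, ih]
      simp only [pvDD, if_pos h]
      simp
    · rw [if_neg h, ih]
      simp only [pvDD, if_neg h]

theorem pvDD_congr (l : List String) : ∀ s t : List String,
    (∀ x, x ∈ s ↔ x ∈ t) → pvDD s l = pvDD t l := by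
  induction l with
  | nil => intro s t _; rfl
  | cons c cs ih =>
    intro s t h
    have hc : s.contains c = t.contains c := by
      by_cases hcs : c ∈ s
      · simp [hcs, (h c).mp hcs]
      · have hct : c ∉ t := fun hct => hcs ((h c).mpr hct)
        simp [hcs, hct]
    simp only [pvDD, hc]
    by_cases h2 : (pvGem c && !t.contains c) = true
    · rw [if_pos h2, if_pos h2,
        ih (s ++ [c]) (t ++ [c]) (by intro x; simp [h x])]
    · rw [if_neg h2, if_neg h2, ih s t h]

theorem pvDD_split (l : List String) : ∀ S T : List String,
    pvDD (S ++ T) l = (pvDD T l).filter (fun c => !S.contains c) := by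
  induction l with
  | nil => intro S T; rfl
  | cons c cs ih =>
    intro S T
    simp only [pvDD]
    by_cases hg : pvGem c = true
    · by_cases hT : c ∈ T
      · have h1 : ((S ++ T).contains c) = true := by simp [hT]
        have h2 : (T.contains c) = true := by simp [hT]
        simp only [h1, h2, hg]
        simpa using ih S T
      · by_cases hS : c ∈ S
        · have h1 : ((S ++ T).contains c) = true := by simp [hS]
          have h2 : (T.contains c) = false := by simpa using hT
          simp only [h1, h2, hg, Bool.not_true, Bool.not_false, Bool.and_true, Bool.and_false,
            reduceIte]
          rw [pvDD_congr cs (S ++ T) (S ++ (T ++ [c])) (by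
              intro x; simp
              constructor
              · tauto
              · rintro (h | h | rfl) <;> tauto),
            ih S (T ++ [c])]
          simp [List.filter, hS]
        · have h1 : ((S ++ T).contains c) = false := by simp [hS, hT]
          have h2 : (T.contains c) = false := by simpa using hT
          simp only [h1, h2, hg, Bool.not_false, Bool.and_true, reduceIte]
          rw [show (S ++ T) ++ [c] = S ++ (T ++ [c]) from by simp, ih S (T ++ [c])]
          simp [List.filter, hS]
    · have hg' : pvGem c = false := by simpa using hg
      simp only [hg', Bool.false_and]
      simpa using ih S T

theorem pvMem_pvDD (l : List String) : ∀ (s : List String) (c : String),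
    c ∈ pvDD s l ↔ pvGem c = true ∧ c ∈ l ∧ c ∉ s := by
  induction l with
  | nil => intro s c; simp [pvDD]
  | cons d ds ih =>
    intro s c
    simp only [pvDD]
    by_cases h : (pvGem d && !s.contains d) = true
    · rw [if_pos h]
      simp only [List.mem_cons, ih]
      constructor
      · rintro (rfl | ⟨h1, h2, h3⟩)
        · simp at h
          exact ⟨h.1, Or.inl rfl, h.2⟩
        · exact ⟨h1, Or.inr h2, fun hc => h3 (by simp [hc])⟩
      · rintro ⟨h1, (rfl | h2), h3⟩
        · exact Or.inl rfl
        · by_cases hcd : c = d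
          · exact Or.inl hcd
          · exact Or.inr ⟨h1, h2, by simp [hcd, h3]⟩
    · rw [if_neg h]
      rw [ih]
      simp only [List.mem_cons]
      constructor
      · rintro ⟨h1, h2, h3⟩; exact ⟨h1, Or.inr h2, h3⟩
      · rintro ⟨h1, (rfl | h2), h3⟩
        · exfalso; simp at h; exact h3 (h h1)
        · exact ⟨h1, h2, h3⟩

theorem pvNodup_pvDD (l : List String) : ∀ s : List String, (pvDD s l).Nodup := by
  induction l with
  | nil => intro s; simp [pvDD]
  | cons c cs ih =>
    intro s
    simp only [pvDD]
    by_cases h : (pvGem c && !s.contains c) = true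
    · rw [if_pos h]
      refine List.nodup_cons.mpr ⟨?_, ih _⟩
      intro hc
      have := (pvMem_pvDD cs (s ++ [c]) c).mp hc
      simp at this
    · rw [if_neg h]; exact ih s

theorem pvFold1_eq (avail : List String) : ∀ (P : List String), P.Nodup → ∀ m0 : List String,
    P.foldl (fun acc n => if avail.contains n && !acc.contains n then acc ++ [n] else acc) m0
      = m0 ++ P.filter (fun n => avail.contains n && !m0.contains n) := by
  intro P
  induction P with
  | nil => intro _ m0; simp
  | cons p ps ih =>
    intro hnd m0
    have hps : ps.Nodup := (List.nodup_cons.mp hnd).2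
    have hp : p ∉ ps := (List.nodup_cons.mp hnd).1
    rw [List.foldl_cons]
    by_cases h : (avail.contains p && !m0.contains p) = true
    · rw [if_pos h, ih hps (m0 ++ [p])]
      rw [List.filter_cons]
      simp only [h, if_pos]
      have : ps.filter (fun n => avail.contains n && !(m0 ++ [p]).contains n)
           = ps.filter (fun n => avail.contains n && !m0.contains n) := by
        apply List.filter_congr
        intro x hx
        have : x ≠ p := fun hxp => hp (hxp ▸ hx)
        simp [this]
      rw [this]; simp
    · rw [if_neg h, ih hps m0, List.filter_cons]
      simp only [h, Bool.false_eq_true, reduceIte]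

theorem pvInsertBy_all_before {α : Type} (before : α → α → Bool) (x : α) (B : List α)
    (h : ∀ y ∈ B, before x y = true) :
    PySem.List.insertBy before x B = x :: B := by
  cases B with
  | nil => rfl
  | cons b bs => simp [PySem.List.insertBy, h b (by simp)]

theorem pvInsertBy_append {α : Type} (before : α → α → Bool) (x : α) (B : List α) : ∀ A : List α,
    (∀ y ∈ A, before x y = false) →
    PySem.List.insertBy before x (A ++ B) = A ++ PySem.List.insertBy before x B := by
  intro A
  induction A with
  | nil => intro _; rfl
  | cons a as ih =>
    intro h
    have ha : before x a = false := h a (by simp)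
    rw [List.cons_append]
    simp only [PySem.List.insertBy, ha]
    simp only [Bool.false_eq_true]
    rw [ih (fun y hy => h y (by simp [hy]))]
    cases as ++ B <;> simp

-- stability: a Nat-keyed stable sort is the concatenation of its key-buckets
theorem pvSorted_buckets {α : Type} (key : α → Nat) (N : Nat) (g : List α)
    (hb : ∀ c ∈ g, key c ≤ N) :
    PySem.List.sorted g key false
      = (List.range (N + 1)).flatMap (fun k => g.filter (fun c => key c = k)) := by
  induction g using List.reverseRecOn with
  | nil => simp [PySem.List.sorted]
  | append_singleton g x ih =>
    have hbg : ∀ c ∈ g, key c ≤ N := fun c hc => hb c (by simp [hc])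
    have hx : key x ≤ N := hb x (by simp)
    rw [PySem.List.sorted_eq_foldl_insertBy, List.foldl_append, List.foldl_cons, List.foldl_nil,
      ← PySem.List.sorted_eq_foldl_insertBy, ih hbg]
    have hsplit : N + 1 = (key x + 1) + (N - key x) := by omega
    rw [hsplit, List.range_add, List.flatMap_append]
    set bf : α → α → Bool := fun a b => decide (key a < key b) with hbf
    set A := (List.range (key x + 1)).flatMap (fun k => g.filter (fun c => key c = k)) with hA
    set B := ((List.range (N - key x)).map (fun j => key x + 1 + j)).flatMap
        (fun k => g.filter (fun c => key c = k)) with hB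
    have hAle : ∀ y ∈ A, bf x y = false := by
      intro y hy
      rw [hA] at hy
      simp only [List.mem_flatMap, List.mem_range, List.mem_filter] at hy
      obtain ⟨k, hk, _, hky⟩ := hy
      have hky' := of_decide_eq_true hky
      simp only [hbf, decide_eq_false_iff_not, not_lt]
      omega
    have hBgt : ∀ y ∈ B, bf x y = true := by
      intro y hy
      rw [hB] at hy
      simp only [List.mem_flatMap, List.mem_map, List.mem_range, List.mem_filter] at hy
      obtain ⟨k, ⟨j, hj, rfl⟩, _, hky⟩ := hy
      have hky' := of_decide_eq_true hky
      simp only [hbf, decide_eq_true_eq]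
      omega
    rw [pvInsertBy_append bf x B A hAle, pvInsertBy_all_before bf x B hBgt]
    have hAside : (List.range (key x + 1)).flatMap (fun k => (g ++ [x]).filter (fun c => key c = k))
        = A ++ [x] := by
      rw [List.range_succ, List.flatMap_append, hA, List.range_succ, List.flatMap_append]
      have h1 : (List.range (key x)).flatMap (fun k => (g ++ [x]).filter (fun c => key c = k))
          = (List.range (key x)).flatMap (fun k => g.filter (fun c => key c = k)) := by
        apply List.flatMap_congr
        intro k hk
        simp only [List.mem_range] at hk
        rw [List.filter_append]
        simp [List.filter, show ¬ key x = k from by omega]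
      rw [h1]
      simp [List.filter_append, List.filter]
    have hBside : ((List.range (N - key x)).map (fun j => key x + 1 + j)).flatMap
          (fun k => (g ++ [x]).filter (fun c => key c = k)) = B := by
      rw [hB]
      apply List.flatMap_congr
      intro k hk
      simp only [List.mem_map, List.mem_range] at hk
      obtain ⟨j, hj, rfl⟩ := hk
      rw [List.filter_append]
      simp [List.filter, show ¬ key x = key x + 1 + j from by omega]
    rw [List.flatMap_append, hAside, hBside]
    simp

theorem pvRank_eq (c : String) : pvRank c =
    if c = "gemini-2.5-pro-preview-03-25" then 0
    else if c = "gemini-2.5-pro-preview" then 1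
    else if c = "gemini-1.5-flash" then 2
    else if c = "gemini-1.5-pro" then 3
    else if c = "gemini-pro" then 4
    else 5 := by
  split_ifs with h1 h2 h3 h4 h5
  · subst h1; decide
  · subst h2; decide
  · subst h3; decide
  · subst h4; decide
  · subst h5; decide
  · have hmem : c ∉ pvPreferred := by simp [pvPreferred, h1, h2, h3, h4, h5]
    unfold pvRank PySem.List.index?
    rw [List.idxOf?_eq_none_iff.mpr hmem]
    rfl

theorem pvRank_le (c : String) : pvRank c ≤ 5 := by
  rw [pvRank_eq]; split_ifs <;> omega

theorem pvFilter_single (a : String) (G : List String) (hG : G.Nodup) :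
    G.filter (fun c => decide (c = a)) = if a ∈ G then [a] else [] := by
  induction G with
  | nil => simp
  | cons g gs ih =>
    have hgs : gs.Nodup := (List.nodup_cons.mp hG).2
    have hg : g ∉ gs := (List.nodup_cons.mp hG).1
    by_cases hga : g = a
    · subst hga
      simp [List.filter, ih hgs, hg]
    · simp [List.filter, hga, ih hgs, List.mem_cons]
      by_cases ha : a ∈ gs <;> simp [ha, Ne.symm hga]

theorem pvBucket_k (G : List String) (hG : G.Nodup) (k : Nat) (a : String)
    (hk : ∀ c, pvRank c = k ↔ c = a) :
    G.filter (fun c => decide (pvRank c = k)) = if a ∈ G then [a] else [] := by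
  rw [List.filter_congr (fun c _ => by simp [hk c] : ∀ c ∈ G,
    (decide (pvRank c = k)) = (decide (c = a)))]
  exact pvFilter_single a G hG

theorem pvBuckets_eq (G : List String) (hG : G.Nodup) :
    (List.range 6).flatMap (fun k => G.filter (fun c => decide (pvRank c = k)))
      = pvPreferred.filter (fun p => decide (p ∈ G))
        ++ G.filter (fun c => !pvPreferred.contains c) := by
  have hr0 : ∀ c, pvRank c = 0 ↔ c = "gemini-2.5-pro-preview-03-25" := by
    intro c; rw [pvRank_eq]; split_ifs <;> simp_all
  have hr1 : ∀ c, pvRank c = 1 ↔ c = "gemini-2.5-pro-preview" := by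
    intro c; rw [pvRank_eq]; split_ifs <;> simp_all
  have hr2 : ∀ c, pvRank c = 2 ↔ c = "gemini-1.5-flash" := by
    intro c; rw [pvRank_eq]; split_ifs <;> simp_all
  have hr3 : ∀ c, pvRank c = 3 ↔ c = "gemini-1.5-pro" := by
    intro c; rw [pvRank_eq]; split_ifs <;> simp_all
  have hr4 : ∀ c, pvRank c = 4 ↔ c = "gemini-pro" := by
    intro c; rw [pvRank_eq]; split_ifs <;> simp_all
  have hr5 : ∀ c, (pvRank c = 5) ↔ c ∉ pvPreferred := by
    intro c; rw [pvRank_eq]; split_ifs with h1 h2 h3 h4 h5 <;>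
      simp_all [pvPreferred]
  have h5' : G.filter (fun c => decide (pvRank c = 5))
      = G.filter (fun c => !pvPreferred.contains c) := by
    apply List.filter_congr
    intro c _
    by_cases h : c ∈ pvPreferred <;> simp [hr5 c, h]
  rw [show List.range 6 = [0, 1, 2, 3, 4, 5] from rfl]
  simp only [List.flatMap_cons, List.flatMap_nil, List.append_nil]
  rw [pvBucket_k G hG 0 _ hr0, pvBucket_k G hG 1 _ hr1, pvBucket_k G hG 2 _ hr2,
    pvBucket_k G hG 3 _ hr3, pvBucket_k G hG 4 _ hr4, h5']
  have : pvPreferred.filter (fun p => decide (p ∈ G)) =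
      (if "gemini-2.5-pro-preview-03-25" ∈ G then ["gemini-2.5-pro-preview-03-25"] else [])
      ++ (if "gemini-2.5-pro-preview" ∈ G then ["gemini-2.5-pro-preview"] else [])
      ++ (if "gemini-1.5-flash" ∈ G then ["gemini-1.5-flash"] else [])
      ++ (if "gemini-1.5-pro" ∈ G then ["gemini-1.5-pro"] else [])
      ++ (if "gemini-pro" ∈ G then ["gemini-pro"] else []) := by
    simp only [pvPreferred, List.filter]
    split_ifs <;> simp_all
  rw [this]
  simp [List.append_assoc]

theorem pvGem_preferred : ∀ p ∈ pvPreferred, pvGem p = true := by decide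

theorem pvGem_ne_empty (c : String) (h : pvGem c = true) : c ≠ "" := by
  rintro rfl; revert h; decide

-- the heart: A's three-stage list equals B's head ++ filtered stable sort
theorem pvMain (avail m0 : List String) (selne : String → Bool)
    (hsel : ∀ p, pvGem p = true → selne p = !m0.contains p) :
    (m0 ++ pvPreferred.filter (fun n => avail.contains n && !m0.contains n))
      ++ pvDD (m0 ++ pvPreferred.filter (fun n => avail.contains n && !m0.contains n)) avail
    = m0 ++ (PySem.List.sorted (pvDD ([] : List String) avail) pvRank false).filter selne := by
  set L1 := pvPreferred.filter (fun n => avail.contains n && !m0.contains n) with hL1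
  set G := pvDD ([] : List String) avail with hG
  have hGnd : G.Nodup := pvNodup_pvDD avail []
  have hGmem : ∀ c, c ∈ G ↔ pvGem c = true ∧ c ∈ avail := by
    intro c
    rw [hG, pvMem_pvDD avail [] c]
    simp
  rw [pvSorted_buckets pvRank 5 G (fun c _ => pvRank_le c)]
  rw [show (5 + 1 : Nat) = 6 from rfl, pvBuckets_eq G hGnd]
  have hsplitDD : pvDD (m0 ++ L1) avail = G.filter (fun c => !(m0 ++ L1).contains c) := by
    rw [hG, ← pvDD_split avail (m0 ++ L1) []]
    simp
  rw [hsplitDD, List.filter_append, List.filter_filter]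
  have hE1 : pvPreferred.filter (fun p => selne p && decide (p ∈ G)) = L1 := by
    rw [hL1]
    apply List.filter_congr
    intro p hp
    have hgem : pvGem p = true := pvGem_preferred p hp
    rw [hsel p hgem]
    have : p ∈ G ↔ p ∈ avail := by rw [hGmem p]; simp [hgem]
    by_cases hpa : p ∈ avail <;> by_cases hpm : p ∈ m0 <;>
      simp [this, hpa, hpm, Bool.and_comm]
  have hE2 : G.filter (fun c => !(m0 ++ L1).contains c)
      = G.filter (fun c => selne c && !pvPreferred.contains c) := by
    apply List.filter_congr
    intro c hc
    obtain ⟨hgem, hav⟩ := (hGmem c).mp hc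
    rw [hsel c hgem]
    have hL1mem : c ∈ L1 ↔ c ∈ pvPreferred ∧ c ∈ avail ∧ c ∉ m0 := by
      rw [hL1]
      simp only [List.mem_filter, Bool.and_eq_true, Bool.not_eq_true']
      constructor
      · rintro ⟨h1, h2, h3⟩
        exact ⟨h1, by simpa using h2, by simpa using h3⟩
      · rintro ⟨h1, h2, h3⟩
        exact ⟨h1, by simpa using h2, by simpa using h3⟩
    by_cases hP : c ∈ pvPreferred <;> by_cases hm : c ∈ m0 <;>
      simp [hL1mem, hP, hm, hav]
  rw [hE1, hE2]
  have hfilterswap : ∀ l : List String, l.filter (fun c => selne c && !pvPreferred.contains c)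
      = (l.filter (fun c => !pvPreferred.contains c)).filter selne := by
    intro l
    rw [List.filter_filter]
  rw [hfilterswap]
  simp

-- ===== VERDICT (by name: the statement is the Claim_ definition above) =====
theorem get_candidate_models_spec : Claim_equal_get_candidate_models := by
  unfold Claim_equal_get_candidate_models
  intro sel avail _
  unfold Spec_get_candidate_models get_candidate_models get_candidate_models_alt
  simp only []
  rw [pvFoldB_eq]
  by_cases hav : avail = []
  · subst hav
    simp [pvDD, PySem.List.sorted]
  · rw [if_neg hav, pvFold1_eq avail pvPreferred (by decide) (pvHead sel), pvFold2_eq]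
    rcases sel with _ | s
    · rw [pvMain avail (pvHead none) (fun _ => true) (by intro p _; simp [pvHead])]
      simp
    · by_cases hs : s = ""
      · subst hs
        rw [pvMain avail (pvHead (some "")) (fun c => decide (c ≠ ""))
          (by intro p hp; simp [pvHead, pvGem_ne_empty p hp])]
        simp
      · rw [pvMain avail (pvHead (some s)) (fun c => decide (c ≠ s))
          (by intro p _; simp [pvHead, hs])]
        simp
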